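-- pv_equiv track=rewrite | github.com/zz9tf/read_wikipedia | code/string_preprocessing.py | remove_braces_content
-- ===== SOURCE A (Python) =====
-- def remove_braces_content(text):
--     stack = []
--     result = []
--     i = 0
--
--     while i < len(text):
--         char = text[i]
--         if char == '{' and i + 1 < len(text) and text[i + 1] == '{':
--             # Push the current length of result onto the stack to remember where the brace started
--             stack.append(len(result))
--             i += 1  # Skip the second '{'
--         elif char == '}' and i + 1 < len(text) and text[i + 1] == '}' and len(stack) > 0:
--             start = stack.pop()
--             block_content = ''.join(result[start:])
--             if '|' in block_content:
--                 if len(block_content.split('|')) == 2: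
--                     # Keep only the content is only two part splitted by '|'
--                     keep_content = block_content.split('|')[1]
--                     result = result[:start] + list(keep_content)
--                 else:
--                     result = result[:start]
--             i += 1  # Skip the second '}'
--         else:
--             # Append character to the result only if not within braces
--             result.append(char)
--         i += 1
--
--     # Join the result back into a string
--     return ''.join(result)
-- ===== SOURCE B (Python) =====
-- def remove_braces_content(text):
--     # One pass with a stack of per-level buffers and incremental pipe counts.
--     stack = []          # saved (buffer, pipe_count) of enclosing levels
--     cur = []            # buffer of the innermost open level (or top level)
--     pipes = 0           # number of '|' currently in cur
--     n = len(text)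
--     i = 0
--     while i < n:
--         c = text[i]
--         if c == '{' and i + 1 < n and text[i + 1] == '{':
--             stack.append((cur, pipes))
--             cur = []
--             pipes = 0
--             i += 2
--         elif c == '}' and i + 1 < n and text[i + 1] == '}' and stack:
--             block, bp = cur, pipes
--             cur, pipes = stack.pop()
--             if bp == 0:
--                 cur.extend(block)           # no '|': block kept verbatim
--             elif bp == 1:
--                 after = block[block.index('|') + 1:]
--                 cur.extend(after)           # exactly one '|': keep second part
--             # more than one '|': block dropped
--             i += 2
--         else:
--             cur.append(c)
--             if c == '|':
--                 pipes += 1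
--             i += 1
--     # unclosed '{{': their content simply stays, as in the original
--     while stack:
--         parent, pipes = stack.pop()
--         parent.extend(cur)
--         cur = parent
--     return ''.join(cur)
-- ===== Notes on version B (the rewrite author's own statement) =====
-- stated objective: alternative
-- what changed: Replaces A's single result list with saved start indices and a join/slice/split of the suffix at every closing brace pair by a one-pass stack of per-level buffers with incrementally tracked pipe counts, each closed block merged upward once.
import Mathlib
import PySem

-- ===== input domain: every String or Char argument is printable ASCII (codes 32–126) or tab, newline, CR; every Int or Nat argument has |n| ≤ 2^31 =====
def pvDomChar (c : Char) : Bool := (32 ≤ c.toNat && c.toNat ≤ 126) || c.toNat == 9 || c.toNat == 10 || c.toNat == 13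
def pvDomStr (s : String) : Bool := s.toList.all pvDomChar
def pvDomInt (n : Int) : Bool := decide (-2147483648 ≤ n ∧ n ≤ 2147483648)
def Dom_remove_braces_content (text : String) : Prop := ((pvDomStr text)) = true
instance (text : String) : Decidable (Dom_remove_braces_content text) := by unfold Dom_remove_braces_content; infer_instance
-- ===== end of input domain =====

-- B replaces A's join/slice/split of the growing result at each closing brace pair by a one-pass stack
-- of per-level buffers with incrementally tracked pipe counts, merged upward once per block.

-- ===== PORT A =====
-- A's while loop over i, transliterated as recursion on the remaining characters
-- (two-character lookahead = the first two list elements); `stack` holds the saved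
-- result lengths (Python list end = list head here), `result` the accumulated chars.
def removeBracesGoA : List Char → List Nat → List Char → List Char
  | [], _stack, result => result
  | [c], _stack, result => result ++ [c]
  | c1 :: c2 :: rest, stack, result =>
    if c1 = '{' ∧ c2 = '{' then
      removeBracesGoA rest (result.length :: stack) result
    else if c1 = '}' ∧ c2 = '}' then
      match stack with
      | start :: stack' =>
        -- block_content = ''.join(result[start:])
        if PySem.Chars.isIn ['|'] (result.drop start) then
          if (PySem.Chars.splitOn (result.drop start) ['|']).length = 2 then
            removeBracesGoA rest stack'
              (result.take start ++ (PySem.Chars.splitOn (result.drop start) ['|']).getD 1 [])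
          else
            removeBracesGoA rest stack' (result.take start)
        else
          removeBracesGoA rest stack' result
      | [] => removeBracesGoA (c2 :: rest) stack (result ++ [c1])
    else
      removeBracesGoA (c2 :: rest) stack (result ++ [c1])

def remove_braces_content (text : String) : String :=
  String.mk (removeBracesGoA text.toList [] [])

-- ===== PORT B =====
-- Source B's final merge loop: while stack: parent.extend(cur); cur = parent
def removeBracesFinishB : List (List Char × Nat) → List Char → List Char
  | [], cur => cur
  | (parent, _) :: stack, cur => removeBracesFinishB stack (parent ++ cur)

-- Source B's scanning loop: stack of (buffer, pipe-count) of the enclosing levels,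
-- `cur`/`pipes` for the innermost open level.
def removeBracesGoB : List Char → List (List Char × Nat) → List Char → Nat → List Char
  | [], stack, cur, _pipes => removeBracesFinishB stack cur
  | [c], stack, cur, _pipes => removeBracesFinishB stack (cur ++ [c])
  | c1 :: c2 :: rest, stack, cur, pipes =>
    if c1 = '{' ∧ c2 = '{' then
      removeBracesGoB rest ((cur, pipes) :: stack) [] 0
    else if c1 = '}' ∧ c2 = '}' then
      match stack with
      | (pcur, ppipes) :: stack' =>
        if pipes = 0 then
          removeBracesGoB rest stack' (pcur ++ cur) ppipes
        else if pipes = 1 then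
          -- block[block.index('|') + 1:]
          removeBracesGoB rest stack' (pcur ++ (cur.dropWhile (· ≠ '|')).tail) ppipes
        else
          removeBracesGoB rest stack' pcur ppipes
      | [] =>
        removeBracesGoB (c2 :: rest) stack (cur ++ [c1]) (if c1 = '|' then pipes + 1 else pipes)
    else
      removeBracesGoB (c2 :: rest) stack (cur ++ [c1]) (if c1 = '|' then pipes + 1 else pipes)

def remove_braces_content_alt (text : String) : String :=
  String.mk (removeBracesGoB text.toList [] [] 0)

-- ===== PRECONDITION & SPEC =====
def Spec_remove_braces_content (text : String) (out : String) : Prop := out = remove_braces_content_alt text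
instance (text : String) (out : String) : Decidable (Spec_remove_braces_content text out) := by unfold Spec_remove_braces_content; infer_instance

-- ===== CLAIM (what is proved, stated in full; the proofs are below) =====
def Claim_equal_remove_braces_content : Prop := ∀ (text : String), Dom_remove_braces_content text → Spec_remove_braces_content text (remove_braces_content text)

-- ===== LEMMAS AND PROOFS =====

theorem finishB_append (st : List (List Char × Nat)) (x y : List Char) :
    removeBracesFinishB st (x ++ y) = removeBracesFinishB st x ++ y := by
  induction st generalizing x with
  | nil => rfl
  | cons p st ih => cases p with | mk b n => simpa [removeBracesFinishB, List.append_assoc] using ih (b ++ x)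

-- the A-side stack of start indices corresponding to a B-side stack of buffers
def removeBracesIdx : List (List Char × Nat) → List Nat
  | [] => []
  | (b, _) :: st => (removeBracesFinishB st b).length :: removeBracesIdx st

-- reference splitter at '|' used to characterise PySem.Chars.splitOn
def pipeSplit : List Char → List (List Char)
  | [] => [[]]
  | c :: rest =>
    if c = '|' then [] :: pipeSplit rest
    else
      match pipeSplit rest with
      | h :: t => (c :: h) :: t
      | [] => [[c]]

theorem pipeSplit_ne_nil (l : List Char) : pipeSplit l ≠ [] := by
  cases l with
  | nil => simp [pipeSplit]
  | cons c rest =>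
    simp only [pipeSplit]
    split_ifs
    · simp
    · cases h : pipeSplit rest <;> simp

theorem splitOn_go_eq (fuel : Nat) :
    ∀ l cur acc : _, l.length ≤ fuel →
      PySem.Chars.splitOn.go ['|'] fuel l cur acc
        = acc.reverse ++ (pipeSplit l).modifyHead (cur.reverse ++ ·) := by
  induction fuel with
  | zero =>
    intro l cur acc h
    have : l = [] := by cases l <;> simp_all
    subst this
    simp [PySem.Chars.splitOn.go, pipeSplit]
  | succ fuel ih =>
    intro l cur acc h
    cases l with
    | nil => simp [PySem.Chars.splitOn.go, pipeSplit]
    | cons c rest =>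
      by_cases hc : c = '|'
      · subst hc
        have hpre : List.isPrefixOf ['|'] ('|' :: rest) = true := by
          simp [List.isPrefixOf]
        rw [PySem.Chars.splitOn.go]
        simp only [hpre, if_true, List.length_cons, List.length_nil, List.drop_succ_cons, List.drop_zero]
        rw [ih rest [] _ (by simpa using Nat.le_of_succ_le_succ h)]
        cases hps : pipeSplit rest with
        | nil => exact absurd hps (pipeSplit_ne_nil rest)
        | cons h0 t => simp [pipeSplit, hps]
      · have hpre : List.isPrefixOf ['|'] (c :: rest) = false := by
          simp only [List.isPrefixOf, Bool.and_eq_false_iff, beq_eq_false_iff_ne, ne_eq]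
          exact Or.inl fun h => hc h.symm
        rw [PySem.Chars.splitOn.go]
        simp only [hpre, Bool.false_eq_true, if_false]
        rw [ih rest (c :: cur) acc (by simpa using Nat.le_of_succ_le_succ h)]
        cases hps : pipeSplit rest with
        | nil => exact absurd hps (pipeSplit_ne_nil rest)
        | cons h0 t => simp [pipeSplit, hps, hc]

theorem splitOn_pipe_eq (l : List Char) :
    PySem.Chars.splitOn l ['|'] = pipeSplit l := by
  rw [PySem.Chars.splitOn, splitOn_go_eq (l.length + 1) l [] [] (by omega)]
  cases hps : pipeSplit l with
  | nil => exact absurd hps (pipeSplit_ne_nil l)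
  | cons h0 t => simp

theorem length_pipeSplit (l : List Char) : (pipeSplit l).length = l.count '|' + 1 := by
  induction l with
  | nil => simp [pipeSplit]
  | cons c rest ih =>
    by_cases hc : c = '|'
    · subst hc; simp [pipeSplit, ih]
    · simp only [pipeSplit, hc, if_false]
      cases hps : pipeSplit rest with
      | nil => exact absurd hps (pipeSplit_ne_nil rest)
      | cons h0 t =>
        rw [hps] at ih
        simp_all

theorem pipeSplit_count_zero (l : List Char) (h : l.count '|' = 0) : pipeSplit l = [l] := by
  induction l with
  | nil => simp [pipeSplit]
  | cons c rest ih =>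
    simp only [List.count_cons] at h
    have hc : c ≠ '|' := by intro hc; simp [hc] at h
    have h0 : rest.count '|' = 0 := by by_cases hcc : c = '|' <;> simp_all
    simp [pipeSplit, hc, ih h0]

theorem pipeSplit_count_one (l : List Char) (h : l.count '|' = 1) :
    pipeSplit l = [l.takeWhile (· ≠ '|'), (l.dropWhile (· ≠ '|')).tail] := by
  induction l with
  | nil => simp at h
  | cons c rest ih =>
    by_cases hc : c = '|'
    · subst hc
      have h0 : rest.count '|' = 0 := by simpa [List.count_cons] using h
      simp [pipeSplit, pipeSplit_count_zero rest h0, List.takeWhile, List.dropWhile]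
    · have h1 : rest.count '|' = 1 := by simpa [List.count_cons, hc] using h
      simp [pipeSplit, ih h1, List.takeWhile, List.dropWhile, hc]

theorem isIn_pipe_iff (l : List Char) : PySem.Chars.isIn ['|'] l = true ↔ '|' ∈ l := by
  rw [PySem.Chars.isIn_iff_infix]
  constructor
  · intro h; exact h.sublist.mem (by simp)
  · intro h
    obtain ⟨s, t, rfl⟩ := List.append_of_mem h
    exact ⟨s, t, by simp⟩

theorem count_tail_dropWhile (l : List Char) (h : l.count '|' = 1) :
    ((l.dropWhile (· ≠ '|')).tail).count '|' = 0 := by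
  induction l with
  | nil => simp at h
  | cons c rest ih =>
    by_cases hc : c = '|'
    · subst hc
      have h0 : rest.count '|' = 0 := by simpa [List.count_cons] using h
      simpa [List.dropWhile] using h0
    · have h1 : rest.count '|' = 1 := by simpa [List.count_cons, hc] using h
      simpa [List.dropWhile, hc] using ih h1

-- main invariant: A run on the flattened buffers with the saved lengths equals B on the stack
theorem removeBraces_main :
    ∀ (l : List Char) (st : List (List Char × Nat)) (cur : List Char) (pipes : Nat),
      pipes = cur.count '|' → (∀ p ∈ st, p.2 = p.1.count '|') →
      removeBracesGoA l (removeBracesIdx st) (removeBracesFinishB st cur)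
        = removeBracesGoB l st cur pipes
  | [], st, cur, pipes, _, _ => by simp [removeBracesGoA, removeBracesGoB]
  | [c], st, cur, pipes, _, _ => by
      simp [removeBracesGoA, removeBracesGoB, finishB_append]
  | c1 :: c2 :: rest, st, cur, pipes, hp, hst => by
      rw [removeBracesGoA.eq_def, removeBracesGoB.eq_def]
      dsimp only
      by_cases hopen : c1 = '{' ∧ c2 = '{'
      · rw [if_pos hopen, if_pos hopen]
        have := removeBraces_main rest ((cur, pipes) :: st) [] 0 (by simp)
          (by
            intro p hpm
            rw [List.mem_cons] at hpm
            cases hpm with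
            | inl h => simp [h, ← hp]
            | inr h => exact hst p h)
        simpa [removeBracesIdx, removeBracesFinishB] using this
      · by_cases hclose : c1 = '}' ∧ c2 = '}'
        · rw [if_neg hopen, if_neg hopen, if_pos hclose, if_pos hclose]
          cases st with
          | nil =>
            simp only [removeBracesIdx, removeBracesFinishB]
            have := removeBraces_main (c2 :: rest) [] (cur ++ [c1])
              (if c1 = '|' then pipes + 1 else pipes)
              (by subst hp; by_cases h : c1 = '|' <;> simp [List.count_append, h]) (by simp)
            simpa [removeBracesFinishB, removeBracesIdx] using this
          | cons p st' =>
            cases p with | mk pcur ppipes =>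
            have hpp : ppipes = pcur.count '|' := hst (pcur, ppipes) (by simp)
            have hst' : ∀ p ∈ st', p.2 = p.1.count '|' := fun p h => hst p (by simp [h])
            have hflat : removeBracesFinishB ((pcur, ppipes) :: st') cur
                = removeBracesFinishB st' pcur ++ cur := by
              simp [removeBracesFinishB, finishB_append]
            simp only [removeBracesIdx, hflat, List.drop_left, List.take_left]
            by_cases hzero : pipes = 0
            · -- no '|' in the block: A keeps result as is, B merges the block verbatim
              have hmem : '|' ∉ cur := by
                rw [← List.count_eq_zero]; omega
              have hin : PySem.Chars.isIn ['|'] cur = false := by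
                rw [← Bool.not_eq_true, isIn_pipe_iff]; exact hmem
              rw [if_pos hzero]
              simp only [hin, Bool.false_eq_true, if_false]
              rw [← finishB_append]
              exact removeBraces_main rest st' (pcur ++ cur) ppipes
                (by simp [hpp, List.count_append, List.count_eq_zero.mpr hmem]) hst'
            · by_cases hone : pipes = 1
              · -- exactly one '|': keep the part after it
                have hcnt : cur.count '|' = 1 := by omega
                have hmem : '|' ∈ cur := by
                  rw [← List.count_pos_iff]; omega
                have hin : PySem.Chars.isIn ['|'] cur = true := (isIn_pipe_iff cur).mpr hmem
                have hsplit := pipeSplit_count_one cur hcnt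
                rw [if_neg hzero, if_pos hone]
                simp only [hin, if_true, splitOn_pipe_eq, hsplit, List.length_cons,
                  List.length_nil, List.getD, List.getElem?_cons_succ,
                  List.getElem?_cons_zero, Option.getD_some]
                rw [← finishB_append]
                exact removeBraces_main rest st'
                  (pcur ++ (cur.dropWhile (· ≠ '|')).tail) ppipes
                  (by
                    have h0 := count_tail_dropWhile cur hcnt
                    rw [hpp, List.count_append]
                    simp at h0 ⊢
                    omega) hst'
              · -- two or more '|': the block is dropped
                have hge : 2 ≤ cur.count '|' := by omega
                have hmem : '|' ∈ cur := by rw [← List.count_pos_iff]; omega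
                have hin : PySem.Chars.isIn ['|'] cur = true := (isIn_pipe_iff cur).mpr hmem
                have hlen : (PySem.Chars.splitOn cur ['|']).length ≠ 2 := by
                  rw [splitOn_pipe_eq, length_pipeSplit]; omega
                rw [if_neg hzero, if_neg hone]
                simp only [hin, if_true, hlen, if_false]
                exact removeBraces_main rest st' pcur ppipes hpp hst'
        · rw [if_neg hopen, if_neg hopen, if_neg hclose, if_neg hclose]
          have := removeBraces_main (c2 :: rest) st (cur ++ [c1])
            (if c1 = '|' then pipes + 1 else pipes)
            (by subst hp; by_cases h : c1 = '|' <;> simp [List.count_append, h]) hst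
          simpa [finishB_append] using this
  termination_by l => l.length

-- ===== VERDICT (by name: the statement is the Claim_ definition above) =====
theorem remove_braces_content_spec : Claim_equal_remove_braces_content := by
  intro text _
  show remove_braces_content text = remove_braces_content_alt text
  have h := removeBraces_main text.toList [] [] 0 (by simp) (by simp)
  simp only [removeBracesIdx, removeBracesFinishB] at h
  unfold remove_braces_content remove_braces_content_alt
  rw [h]
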